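-- pv_equiv track=rewrite | github.com/PyCodeJourney/cs50-python-intro-tasks | plates.py | digits_pattern_check
-- ===== SOURCE A (Python) =====
-- def digits_pattern_check(s):
--     found_digit = False
--     for char in s:
--         if char.isdigit():
--             if found_digit:
--                 continue
--             else:
--                 found_digit = True
--         elif found_digit:
--             return False
--     return True
-- ===== SOURCE B (Python) =====
-- def digits_pattern_check(s):
--     i = next((j for j, c in enumerate(s) if c.isdigit()), len(s))
--     return all(c.isdigit() for c in s[i:])
-- ===== Notes on version B (the rewrite author's own statement) =====
-- stated objective: simpler
-- what changed: Replaces the stateful flag-driven scan with two standard-library passes: locate the first digit's index, then test that every character from there on is a digit.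
import Mathlib
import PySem

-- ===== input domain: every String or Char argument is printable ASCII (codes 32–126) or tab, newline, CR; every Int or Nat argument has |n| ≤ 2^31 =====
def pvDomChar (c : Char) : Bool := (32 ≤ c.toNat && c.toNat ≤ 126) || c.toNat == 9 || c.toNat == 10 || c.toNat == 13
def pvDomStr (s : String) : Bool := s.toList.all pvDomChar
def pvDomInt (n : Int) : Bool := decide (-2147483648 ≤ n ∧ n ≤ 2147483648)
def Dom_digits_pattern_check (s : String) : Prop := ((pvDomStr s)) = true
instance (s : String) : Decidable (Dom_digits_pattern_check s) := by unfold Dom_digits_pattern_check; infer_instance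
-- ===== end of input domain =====

-- B replaces A's stateful flag-driven scan with two library-style passes:
-- find the first digit's index, then check that the whole suffix from there is digits.

-- ===== PORT A =====
-- the loop over `s` with the `found_digit` flag and early `return False`
def pvLoopA : List Char → Bool → Bool
  | [], _ => true
  | c :: cs, found =>
    if PySem.Chars.isdigit c then pvLoopA cs true
    else if found then false
    else pvLoopA cs found

def digits_pattern_check (s : String) : Bool := pvLoopA s.toList false

-- ===== PORT B =====
-- next((j for j, c in enumerate(s) if c.isdigit()), len(s)) : first digit index, else len
def pvFirstDigit : List Char → Nat → Nat
  | [], n => n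
  | c :: cs, n => if PySem.Chars.isdigit c then n else pvFirstDigit cs (n + 1)

-- all(c.isdigit() for c in s[i:]); i is a nonnegative in-range index so s[i:] = drop i
def digits_pattern_check_alt (s : String) : Bool :=
  (s.toList.drop (pvFirstDigit s.toList 0)).all PySem.Chars.isdigit

-- ===== PRECONDITION & SPEC =====
def Spec_digits_pattern_check (s : String) (out : Bool) : Prop := out = digits_pattern_check_alt s
instance (s : String) (out : Bool) : Decidable (Spec_digits_pattern_check s out) := by unfold Spec_digits_pattern_check; infer_instance

-- ===== CLAIM (what is proved, stated in full; the proofs are below) =====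
def Claim_equal_digits_pattern_check : Prop := ∀ (s : String), Dom_digits_pattern_check s → Spec_digits_pattern_check s (digits_pattern_check s)

-- ===== LEMMAS AND PROOFS =====
theorem pvLoopA_true (cs : List Char) : pvLoopA cs true = cs.all PySem.Chars.isdigit := by
  induction cs with
  | nil => rfl
  | cons c cs ih =>
    simp only [pvLoopA, List.all_cons]
    by_cases h : PySem.Chars.isdigit c = true <;> simp [h, ih]

theorem pvFirstDigit_shift (cs : List Char) (n : Nat) :
    pvFirstDigit cs n = n + pvFirstDigit cs 0 := by
  induction cs generalizing n with
  | nil => simp [pvFirstDigit]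
  | cons c cs ih =>
    by_cases h : PySem.Chars.isdigit c = true
    · simp [pvFirstDigit, h]
    · simp [pvFirstDigit, h]
      rw [ih (n + 1), ih 1]
      omega

theorem pvLoopA_false (cs : List Char) :
    pvLoopA cs false = (cs.drop (pvFirstDigit cs 0)).all PySem.Chars.isdigit := by
  induction cs with
  | nil => rfl
  | cons c cs ih =>
    by_cases h : PySem.Chars.isdigit c = true
    · simp [pvLoopA, pvFirstDigit, h, pvLoopA_true]
    · simp [pvLoopA, pvFirstDigit, h]
      rw [ih, pvFirstDigit_shift cs 1]
      simp [Nat.add_comm 1 (pvFirstDigit cs 0)]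

-- ===== VERDICT (by name: the statement is the Claim_ definition above) =====
theorem digits_pattern_check_spec : Claim_equal_digits_pattern_check := by
  intro s _
  unfold Spec_digits_pattern_check digits_pattern_check digits_pattern_check_alt
  exact pvLoopA_false s.toList
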